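-- pv_equiv track=rewrite | github.com/ColeMorton/sensylate | scripts/utils/dasv_cross_validator.py | _generate_synthesis_recommendations
-- ===== SOURCE A (Python) =====
-- from typing import Any, Dict, List, Optional, Tuple
--
-- def _generate_synthesis_recommendations(violations: List[str]) -> List[str]:
--     """Generate recommendations for synthesis phase improvements"""
--     recommendations = []
--
--     if any("too short" in v.lower() for v in violations):
--         recommendations.append(
--             "Expand synthesis content to meet institutional standards"
--         )
--
--     if any("missing" in v.lower() for v in violations):
--         recommendations.append(
--             "Include all required economic indicators and analysis"
--         )
--
--     if any("hardcoded" in v.lower() for v in violations):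
--         recommendations.append(
--             "Replace hardcoded values with dynamic data references"
--         )
--
--     return recommendations
-- ===== SOURCE B (Python) =====
-- def _generate_synthesis_recommendations(violations):
--     too_short = missing = hardcoded = False
--     for v in violations:
--         lv = v.lower()
--         too_short = too_short or ("too short" in lv)
--         missing = missing or ("missing" in lv)
--         hardcoded = hardcoded or ("hardcoded" in lv)
--     out = []
--     if too_short:
--         out.append("Expand synthesis content to meet institutional standards")
--     if missing:
--         out.append("Include all required economic indicators and analysis")
--     if hardcoded:
--         out.append("Replace hardcoded values with dynamic data references")
--     return out
-- ===== Notes on version B (the rewrite author's own statement) =====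
-- stated objective: faster
-- what changed: Replaces three separate any(... in v.lower()) scans over the list with a single pass that lowercases each violation once and ORs the three keyword tests into flags, then builds the result from the flags.
import Mathlib
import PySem

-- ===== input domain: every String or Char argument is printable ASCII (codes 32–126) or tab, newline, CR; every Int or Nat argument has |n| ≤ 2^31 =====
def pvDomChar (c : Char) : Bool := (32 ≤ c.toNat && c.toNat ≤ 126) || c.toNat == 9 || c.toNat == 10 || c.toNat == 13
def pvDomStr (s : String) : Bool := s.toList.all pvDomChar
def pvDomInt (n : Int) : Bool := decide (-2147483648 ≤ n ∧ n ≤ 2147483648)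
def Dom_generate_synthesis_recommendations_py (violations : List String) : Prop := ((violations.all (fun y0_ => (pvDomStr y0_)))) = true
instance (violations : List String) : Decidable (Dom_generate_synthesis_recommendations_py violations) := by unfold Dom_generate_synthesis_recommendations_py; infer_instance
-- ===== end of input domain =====

-- B differs from A by one decomposition: B lowercases each violation once in a single pass
-- and ORs the three keyword tests into flags, then builds the result from the flags
-- (alternative decomposition; same return value).

-- ===== PORT A =====
-- A: three separate any-scans, each appending its recommendation if its keyword occurs.
def generate_synthesis_recommendations_py (violations : List String) : List String :=
  let recommendations : List String := []
  let recommendations :=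
    if violations.any (fun v => PySem.Str.isIn "too short" (PySem.Str.lower v)) then
      recommendations ++ ["Expand synthesis content to meet institutional standards"]
    else recommendations
  let recommendations :=
    if violations.any (fun v => PySem.Str.isIn "missing" (PySem.Str.lower v)) then
      recommendations ++ ["Include all required economic indicators and analysis"]
    else recommendations
  let recommendations :=
    if violations.any (fun v => PySem.Str.isIn "hardcoded" (PySem.Str.lower v)) then
      recommendations ++ ["Replace hardcoded values with dynamic data references"]
    else recommendations
  recommendations

-- ===== PORT B =====
-- B: one fold computing three boolean flags, then a flag-guarded build phase.
def generate_synthesis_recommendations_py_alt (violations : List String) : List String :=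
  let flags := violations.foldl
    (fun (acc : Bool × Bool × Bool) v =>
      let lv := PySem.Str.lower v
      (acc.1 || PySem.Str.isIn "too short" lv,
       acc.2.1 || PySem.Str.isIn "missing" lv,
       acc.2.2 || PySem.Str.isIn "hardcoded" lv))
    (false, false, false)
  (if flags.1 then ["Expand synthesis content to meet institutional standards"] else []) ++
  (if flags.2.1 then ["Include all required economic indicators and analysis"] else []) ++
  (if flags.2.2 then ["Replace hardcoded values with dynamic data references"] else [])

-- ===== PRECONDITION & SPEC =====
def Spec_generate_synthesis_recommendations_py (violations : List String) (out : List String) : Prop := out = generate_synthesis_recommendations_py_alt violations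
instance (violations : List String) (out : List String) : Decidable (Spec_generate_synthesis_recommendations_py violations out) := by unfold Spec_generate_synthesis_recommendations_py; infer_instance

-- ===== CLAIM (what is proved, stated in full; the proofs are below) =====
def Claim_equal_generate_synthesis_recommendations_py : Prop := ∀ (violations : List String), Dom_generate_synthesis_recommendations_py violations → Spec_generate_synthesis_recommendations_py violations (generate_synthesis_recommendations_py violations)

-- ===== LEMMAS AND PROOFS =====

-- The fold's flags are the three `any` tests.
theorem pv_flags_eq (violations : List String) (a b c : Bool) :
    violations.foldl
      (fun (acc : Bool × Bool × Bool) v =>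
        let lv := PySem.Str.lower v
        (acc.1 || PySem.Str.isIn "too short" lv,
         acc.2.1 || PySem.Str.isIn "missing" lv,
         acc.2.2 || PySem.Str.isIn "hardcoded" lv))
      (a, b, c)
    = (a || violations.any (fun v => PySem.Str.isIn "too short" (PySem.Str.lower v)),
       b || violations.any (fun v => PySem.Str.isIn "missing" (PySem.Str.lower v)),
       c || violations.any (fun v => PySem.Str.isIn "hardcoded" (PySem.Str.lower v))) := by
  induction violations generalizing a b c with
  | nil => simp
  | cons v vs ih =>
      simp only [List.foldl_cons, List.any_cons, ih]
      simp [Bool.or_assoc]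

-- ===== VERDICT (by name: the statement is the Claim_ definition above) =====
theorem generate_synthesis_recommendations_py_spec : Claim_equal_generate_synthesis_recommendations_py := by
  intro violations _
  unfold Spec_generate_synthesis_recommendations_py
  unfold generate_synthesis_recommendations_py generate_synthesis_recommendations_py_alt
  rw [pv_flags_eq]
  simp only [Bool.false_or]
  cases h1 : violations.any (fun v => PySem.Str.isIn "too short" (PySem.Str.lower v)) <;>
  cases h2 : violations.any (fun v => PySem.Str.isIn "missing" (PySem.Str.lower v)) <;>
  cases h3 : violations.any (fun v => PySem.Str.isIn "hardcoded" (PySem.Str.lower v)) <;>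
  simp only [h1, h2, h3, if_true, Bool.false_eq_true, if_false, List.nil_append,
    List.append_nil, List.cons_append]
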